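-- pv_equiv track=rewrite | github.com/jskim7018/leetcode_study | algorithm_study/2025/12/20251218/easy/LC_3662.py | filterCharacters
-- ===== SOURCE A (Python) =====
-- from collections import Counter
--
-- def filterCharacters(s: str, k: int) -> str:
--     counter = Counter(s)
--
--     keep_st = set()
--
--     for v, f in counter.items():
--         if f < k:
--             keep_st.add(v)
--
--     ans = ''
--     for ch in s:
--         if ch in keep_st:
--             ans += ch
--
--     return ans
-- ===== SOURCE B (Python) =====
-- def filterCharacters(s: str, k: int) -> str:
--     # Sort-and-scan: consecutive runs in sorted(s) give each char's frequency.
--     srt = sorted(s)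
--     keep = set()
--     if srt:
--         cur = srt[0]
--         run = 1
--         for ch in srt[1:]:
--             if ch == cur:
--                 run += 1
--             else:
--                 if run < k:
--                     keep.add(cur)
--                 cur = ch
--                 run = 1
--         if run < k:
--             keep.add(cur)
--     return ''.join(c for c in s if c in keep)
-- ===== Notes on version B (the rewrite author's own statement) =====
-- stated objective: alternative
-- what changed: Replaces the Counter hash-table phase by sorting the string and scanning consecutive runs to decide which characters to keep, then filters the original string by that keep-set.
import Mathlib
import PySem

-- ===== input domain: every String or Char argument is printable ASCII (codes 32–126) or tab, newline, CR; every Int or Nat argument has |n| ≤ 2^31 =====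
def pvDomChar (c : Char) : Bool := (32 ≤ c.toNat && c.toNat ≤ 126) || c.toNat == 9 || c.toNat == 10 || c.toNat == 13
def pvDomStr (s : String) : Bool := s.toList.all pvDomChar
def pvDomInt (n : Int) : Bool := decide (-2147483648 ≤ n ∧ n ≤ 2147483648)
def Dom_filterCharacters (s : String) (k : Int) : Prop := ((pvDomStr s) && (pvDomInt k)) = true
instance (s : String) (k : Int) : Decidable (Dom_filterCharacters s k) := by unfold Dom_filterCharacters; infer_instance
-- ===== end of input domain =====

-- B replaces A's Counter phase by a sort-and-scan over runs; same return value, no speed claim.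

-- ===== PORT A =====
def filterCharacters (s : String) (k : Int) : String :=
  let l := s.toList
  let counter : PySem.Dict Char Int := PySem.Dict.counter l
  let keep_st : PySem.Set Char :=
    counter.items.foldl (fun st p => if p.2 < k then PySem.Set.add st p.1 else st) PySem.Set.empty
  let ans : List Char :=
    l.foldl (fun acc ch => if PySem.Set.contains keep_st ch then acc ++ [ch] else acc) []
  String.mk ans

-- ===== PORT B =====
-- run scan over the tail of sorted(s): state = (current char, current run length, keep set)
def scanRuns (k : Int) : Char → Int → PySem.Set Char → List Char → PySem.Set Char
  | cur, run, keep, [] => if run < k then PySem.Set.add keep cur else keep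
  | cur, run, keep, ch :: rest =>
      if ch == cur then scanRuns k cur (run + 1) keep rest
      else scanRuns k ch 1 (if run < k then PySem.Set.add keep cur else keep) rest

def filterCharacters_alt (s : String) (k : Int) : String :=
  let l := s.toList
  let srt := PySem.List.sorted l (fun c => c) false
  let keep : PySem.Set Char :=
    match srt with
    | [] => PySem.Set.empty
    | c :: t => scanRuns k c 1 PySem.Set.empty t
  String.mk (l.filter (fun c => PySem.Set.contains keep c))

-- ===== PRECONDITION & SPEC =====
def Spec_filterCharacters (s : String) (k : Int) (out : String) : Prop := out = filterCharacters_alt s k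
instance (s : String) (k : Int) (out : String) : Decidable (Spec_filterCharacters s k out) := by unfold Spec_filterCharacters; infer_instance

-- ===== CLAIM (what is proved, stated in full; the proofs are below) =====
def Claim_equal_filterCharacters : Prop := ∀ (s : String) (k : Int), Dom_filterCharacters s k → Spec_filterCharacters s k (filterCharacters s k)

-- ===== LEMMAS AND PROOFS =====

-- membership in A's keep-set fold
lemma mem_foldl_if_add (k : Int) (ps : List (Char × Int)) (st : PySem.Set Char) (x : Char) :
    x ∈ ps.foldl (fun st p => if p.2 < k then PySem.Set.add st p.1 else st) st ↔
      x ∈ st ∨ ∃ p ∈ ps, p.2 < k ∧ x = p.1 := by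
  induction ps generalizing st with
  | nil => simp
  | cons p ps ih =>
    simp only [List.foldl_cons]
    by_cases h : p.2 < k
    · simp only [if_pos h, ih, PySem.Set.mem_add]
      constructor
      · rintro (⟨hx | rfl⟩ | ⟨q, hq, hqk, rfl⟩)
        · exact Or.inl hx
        · exact Or.inr ⟨p, by simp, h, rfl⟩
        · exact Or.inr ⟨q, by simp [hq], hqk, rfl⟩
      · rintro (hx | ⟨q, hq, hqk, rfl⟩)
        · exact Or.inl (Or.inl hx)
        · rcases List.mem_cons.mp hq with rfl | hq
          · exact Or.inl (Or.inr rfl)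
          · exact Or.inr ⟨q, hq, hqk, rfl⟩
    · simp only [if_neg h, ih]
      constructor
      · rintro (hx | ⟨q, hq, hqk, rfl⟩)
        · exact Or.inl hx
        · exact Or.inr ⟨q, by simp [hq], hqk, rfl⟩
      · rintro (hx | ⟨q, hq, hqk, rfl⟩)
        · exact Or.inl hx
        · rcases List.mem_cons.mp hq with rfl | hq
          · exact absurd hqk h
          · exact Or.inr ⟨q, hq, hqk, rfl⟩

lemma mem_keepA (l : List Char) (k : Int) (x : Char) :
    x ∈ (PySem.Dict.counter l).items.foldl
        (fun st p => if p.2 < k then PySem.Set.add st p.1 else st) PySem.Set.empty ↔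
      x ∈ l ∧ (l.count x : Int) < k := by
  rw [mem_foldl_if_add, PySem.Dict.items_counter]
  constructor
  · rintro (hx | ⟨p, hp, hpk, rfl⟩)
    · simp [PySem.Set.empty] at hx
    · rcases List.mem_map.mp hp with ⟨c, hc, rfl⟩
      exact ⟨(PySem.Set.mem_ofList _ _).mp hc, hpk⟩
  · rintro ⟨hx, hk⟩
    exact Or.inr ⟨(x, (l.count x : Int)), List.mem_map.mpr ⟨x, (PySem.Set.mem_ofList _ _).mpr hx, rfl⟩, hk, rfl⟩

-- membership after the run scan on a sorted tail
lemma mem_scanRuns (k : Int) (rest : List Char) :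
    ∀ (cur : Char) (run : Int) (keep : PySem.Set Char),
      rest.Pairwise (· ≤ ·) → (∀ y ∈ rest, cur ≤ y) →
      ∀ x, x ∈ scanRuns k cur run keep rest ↔
        x ∈ keep ∨ (x = cur ∧ run + (rest.count cur : Int) < k) ∨
          (x ∈ rest ∧ x ≠ cur ∧ (rest.count x : Int) < k) := by
  induction rest with
  | nil =>
    intro cur run keep _ _ x
    simp only [scanRuns, List.count_nil, List.not_mem_nil]
    by_cases h : run < k
    · simp [PySem.Set.mem_add, h]
    · simp [h]
  | cons ch rest ih =>
    intro cur run keep hp hge x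
    have hp' : rest.Pairwise (· ≤ ·) := (List.pairwise_cons.mp hp).2
    have hch : ∀ y ∈ rest, ch ≤ y := (List.pairwise_cons.mp hp).1
    simp only [scanRuns]
    by_cases heq : ch = cur
    · subst heq
      rw [if_pos (by simp)]
      rw [ih ch (run + 1) keep hp' hch x]
      have hc : ((ch :: rest).count ch : Int) = (rest.count ch : Int) + 1 := by
        simp [List.count_cons_self]
      constructor
      · rintro (hx | ⟨rfl, hk⟩ | ⟨hx, hne, hk⟩)
        · exact Or.inl hx
        · exact Or.inr (Or.inl ⟨rfl, by omega⟩)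
        · exact Or.inr (Or.inr ⟨List.mem_cons_of_mem _ hx, hne,
            by rwa [List.count_cons_of_ne (Ne.symm hne)]⟩)
      · rintro (hx | ⟨rfl, hk⟩ | ⟨hx, hne, hk⟩)
        · exact Or.inl hx
        · exact Or.inr (Or.inl ⟨rfl, by omega⟩)
        · rcases List.mem_cons.mp hx with rfl | hx
          · exact absurd rfl hne
          · exact Or.inr (Or.inr ⟨hx, hne,
              by rwa [List.count_cons_of_ne (Ne.symm hne)] at hk⟩)
    · rw [if_neg (by simp [heq])]
      have hcur_lt : cur < ch := lt_of_le_of_ne (hge ch (by simp)) (fun h => heq h.symm)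
      have hcur_not : cur ∉ ch :: rest := by
        intro hmem
        rcases List.mem_cons.mp hmem with rfl | hmem
        · exact absurd rfl (ne_of_lt hcur_lt)
        · exact absurd (hch cur hmem) (hcur_lt.not_ge)
      have hcnt0 : (ch :: rest).count cur = 0 := List.count_eq_zero.mpr hcur_not
      rw [ih ch 1 _ hp' hch x]
      have hkeep' : x ∈ (if run < k then PySem.Set.add keep cur else keep) ↔
          x ∈ keep ∨ (x = cur ∧ run < k) := by
        by_cases h : run < k
        · simp [PySem.Set.mem_add, h]
        · simp [h]
      rw [hkeep']
      constructor
      · rintro ((hx | ⟨rfl, hk⟩) | ⟨rfl, hk⟩ | ⟨hx, hne, hk⟩)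
        · exact Or.inl hx
        · exact Or.inr (Or.inl ⟨rfl, by rw [hcnt0]; push_cast; omega⟩)
        · refine Or.inr (Or.inr ⟨by simp, heq, ?_⟩)
          rw [List.count_cons_self]; push_cast; omega
        · have hne_cur : x ≠ cur := by
            intro h; subst h; exact hcur_not (List.mem_cons_of_mem _ hx)
          refine Or.inr (Or.inr ⟨List.mem_cons_of_mem _ hx, hne_cur, ?_⟩)
          rwa [List.count_cons_of_ne (Ne.symm hne)]
      · rintro (hx | ⟨rfl, hk⟩ | ⟨hx, hne, hk⟩)
        · exact Or.inl (Or.inl hx)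
        · exact Or.inl (Or.inr ⟨rfl, by rw [hcnt0] at hk; push_cast at hk; omega⟩)
        · rcases List.mem_cons.mp hx with rfl | hx
          · refine Or.inr (Or.inl ⟨rfl, ?_⟩)
            rw [List.count_cons_self] at hk; push_cast at * ; omega
          · by_cases hxch : x = ch
            · subst hxch
              refine Or.inr (Or.inl ⟨rfl, ?_⟩)
              rw [List.count_cons_self] at hk; push_cast at * ; omega
            · exact Or.inr (Or.inr ⟨hx, hxch,
                by rwa [List.count_cons_of_ne (Ne.symm hxch)] at hk⟩)

lemma mem_keepB (l : List Char) (k : Int) (x : Char) :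
    (x ∈ match PySem.List.sorted l (fun c => c) false with
         | [] => (PySem.Set.empty : PySem.Set Char)
         | c :: t => scanRuns k c 1 PySem.Set.empty t) ↔
      x ∈ l ∧ (l.count x : Int) < k := by
  have hperm := PySem.List.sorted_perm l (fun c => c) false
  cases hsrt : PySem.List.sorted l (fun c => c) false with
  | nil =>
    have : l = [] := by
      have := hperm; rw [hsrt] at this; exact (List.Perm.nil_eq this).symm
    subst this
    simp [PySem.Set.empty]
  | cons c t =>
    have hpw : (c :: t).Pairwise (· ≤ ·) := by
      have := PySem.List.sorted_pairwise l (fun c => c) (κ := Char)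
      rw [hsrt] at this; exact this
    have hp' : t.Pairwise (· ≤ ·) := (List.pairwise_cons.mp hpw).2
    have hge : ∀ y ∈ t, c ≤ y := (List.pairwise_cons.mp hpw).1
    rw [mem_scanRuns k t c 1 PySem.Set.empty hp' hge x]
    have hcount : ∀ y : Char, (c :: t).count y = l.count y := by
      intro y
      have := hperm; rw [hsrt] at this; exact this.count_eq y
    have hmem : ∀ y : Char, y ∈ (c :: t) ↔ y ∈ l := by
      intro y
      have := hperm; rw [hsrt] at this; exact this.mem_iff
    constructor
    · rintro (hx | ⟨rfl, hk⟩ | ⟨hx, hne, hk⟩)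
      · simp [PySem.Set.empty] at hx
      · refine ⟨(hmem x).mp (by simp), ?_⟩
        rw [← hcount x, List.count_cons_self]; push_cast; omega
      · refine ⟨(hmem x).mp (List.mem_cons_of_mem _ hx), ?_⟩
        rw [← hcount x, List.count_cons_of_ne (Ne.symm hne)]; exact hk
    · rintro ⟨hx, hk⟩
      by_cases hxc : x = c
      · subst hxc
        refine Or.inr (Or.inl ⟨rfl, ?_⟩)
        rw [← hcount x, List.count_cons_self] at hk; push_cast at * ; omega
      · have hxt : x ∈ t := by
          rcases List.mem_cons.mp ((hmem x).mpr hx) with rfl | h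
          · exact absurd rfl hxc
          · exact h
        refine Or.inr (Or.inr ⟨hxt, hxc, ?_⟩)
        rwa [← hcount x, List.count_cons_of_ne (Ne.symm hxc)] at hk

-- ===== VERDICT (by name: the statement is the Claim_ definition above) =====
theorem filterCharacters_spec : Claim_equal_filterCharacters := by
  intro s k _
  unfold Spec_filterCharacters filterCharacters filterCharacters_alt
  simp only
  rw [PySem.List.foldl_append_if_eq_filter]
  simp only [List.nil_append]
  congr 1
  apply List.filter_congr
  intro x hx
  rw [Bool.eq_iff_iff, PySem.Set.contains_iff, PySem.Set.contains_iff,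
      mem_keepA s.toList k x, mem_keepB s.toList k x]
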